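-- pv_equiv track=rewrite | github.com/jthickma/dynasty-hq | app/importer.py | _position_group
-- ===== SOURCE A (Python) =====
-- from typing import Optional
--
-- POSITION_GROUPS = {
--     "QB": {"QB"},
--     "RB": {"HB", "FB", "RB"},
--     "WR": {"WR"},
--     "TE": {"TE"},
--     "OL": {"LT", "LG", "C", "RG", "RT", "OL"},
--     "DL": {"LE", "RE", "DT", "DL", "REDG"},
--     "LB": {"LOLB", "MLB", "ROLB", "LB", "SAM", "WILL", "MIKE"},
--     "DB": {"CB", "FS", "SS", "S", "DB"},
--     "ST": {"K", "P", "LS"},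
-- }
--
-- def _position_group(pos: Optional[str]) -> Optional[str]:
--     if pos is None:
--         return None
--     normalized = pos.upper()
--     for group, positions in POSITION_GROUPS.items():
--         if normalized in positions:
--             return group
--     return None
-- ===== SOURCE B (Python) =====
-- from typing import Optional
--
-- # Flat (code, group) pairs sorted by code, so the lookup can binary-search.
-- _SORTED = (
--     ("C", "OL"), ("CB", "DB"), ("DB", "DB"), ("DL", "DL"), ("DT", "DL"),
--     ("FB", "RB"), ("FS", "DB"), ("HB", "RB"), ("K", "ST"), ("LB", "LB"),
--     ("LE", "DL"), ("LG", "OL"), ("LOLB", "LB"), ("LS", "ST"), ("LT", "OL"),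
--     ("MIKE", "LB"), ("MLB", "LB"), ("OL", "OL"), ("P", "ST"), ("QB", "QB"),
--     ("RB", "RB"), ("RE", "DL"), ("REDG", "DL"), ("RG", "OL"), ("ROLB", "LB"),
--     ("RT", "OL"), ("S", "DB"), ("SAM", "LB"), ("SS", "DB"), ("TE", "TE"),
--     ("WILL", "LB"), ("WR", "WR"),
-- )
--
-- def _position_group(pos: Optional[str]) -> Optional[str]:
--     if pos is None:
--         return None
--     target = pos.upper()
--     lo, hi = 0, len(_SORTED) - 1
--     while lo <= hi:
--         mid = (lo + hi) // 2
--         code, group = _SORTED[mid]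
--         if code == target:
--             return group
--         if code < target:
--             lo = mid + 1
--         else:
--             hi = mid - 1
--     return None
-- ===== Notes on version B (the rewrite author's own statement) =====
-- stated objective: alternative
-- what changed: Replaced the per-call linear scan over the dict of position sets with a hand-written binary search over one flat array of (code, group) pairs kept sorted by code; correct because the group sets are pairwise disjoint, so each code has a unique group.
import Mathlib
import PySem

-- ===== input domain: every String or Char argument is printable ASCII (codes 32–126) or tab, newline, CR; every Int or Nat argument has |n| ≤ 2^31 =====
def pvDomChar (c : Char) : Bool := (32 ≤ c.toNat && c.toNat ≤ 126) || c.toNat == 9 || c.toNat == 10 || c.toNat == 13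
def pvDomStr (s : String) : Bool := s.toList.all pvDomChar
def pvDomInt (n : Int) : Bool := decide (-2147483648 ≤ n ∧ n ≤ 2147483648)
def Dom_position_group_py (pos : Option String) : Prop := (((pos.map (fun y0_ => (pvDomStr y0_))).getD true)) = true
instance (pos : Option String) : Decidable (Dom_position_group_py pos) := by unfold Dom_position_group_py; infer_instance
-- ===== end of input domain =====

-- B replaces A's linear scan over the dict of position sets with a binary search
-- over one flat (code, group) array sorted by code (alternative algorithm, same task).


-- ===== PORT A =====
-- POSITION_GROUPS: dict of group -> set of codes (a Python set is a PySem.Set)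
def pvPositionGroups : List (String × PySem.Set String) :=
  [("QB", ["QB"]),
   ("RB", ["HB", "FB", "RB"]),
   ("WR", ["WR"]),
   ("TE", ["TE"]),
   ("OL", ["LT", "LG", "C", "RG", "RT", "OL"]),
   ("DL", ["LE", "RE", "DT", "DL", "REDG"]),
   ("LB", ["LOLB", "MLB", "ROLB", "LB", "SAM", "WILL", "MIKE"]),
   ("DB", ["CB", "FS", "SS", "S", "DB"]),
   ("ST", ["K", "P", "LS"])]

-- the for-loop with early return: first group whose set contains normalized
def pvScanGroups (normalized : String) : List (String × PySem.Set String) → Option String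
  | [] => none
  | (group, positions) :: rest =>
      if PySem.Set.contains positions normalized then some group
      else pvScanGroups normalized rest

def position_group_py (pos : Option String) : Option String :=
  match pos with
  | none => none
  | some p => pvScanGroups (PySem.Str.upper p) pvPositionGroups

-- ===== PORT B =====
-- _SORTED: flat (code, group) pairs sorted by code
def pvSorted : List (String × String) :=
  [("C", "OL"), ("CB", "DB"), ("DB", "DB"), ("DL", "DL"), ("DT", "DL"),
   ("FB", "RB"), ("FS", "DB"), ("HB", "RB"), ("K", "ST"), ("LB", "LB"),
   ("LE", "DL"), ("LG", "OL"), ("LOLB", "LB"), ("LS", "ST"), ("LT", "OL"),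
   ("MIKE", "LB"), ("MLB", "LB"), ("OL", "OL"), ("P", "ST"), ("QB", "QB"),
   ("RB", "RB"), ("RE", "DL"), ("REDG", "DL"), ("RG", "OL"), ("ROLB", "LB"),
   ("RT", "OL"), ("S", "DB"), ("SAM", "LB"), ("SS", "DB"), ("TE", "TE"),
   ("WILL", "LB"), ("WR", "WR")]

-- Python's 'code < target' on str: lexicographic comparison of Unicode code points (exact)
def pvLtChars : List Char → List Char → Bool
  | [], [] => false
  | [], _ :: _ => true
  | _ :: _, [] => false
  | c :: cs, d :: ds =>
      if c.toNat < d.toNat then true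
      else if d.toNat < c.toNat then false
      else pvLtChars cs ds

def pvStrLt (a b : String) : Bool := pvLtChars a.toList b.toList

-- the while loop of Source B, fuel-bounded (fuel only makes the recursion structural;
-- 33 > log2 32 + 1 iterations, the loop never exhausts it on the 32-entry table)
def pvBSearch (target : String) : Nat → Int → Int → Option String
  | 0, _, _ => none
  | fuel + 1, lo, hi =>
      if lo ≤ hi then
        let mid := PySem.Int.floordiv (lo + hi) 2
        match PySem.List.pyGet? pvSorted mid with
        | none => none
        | some (code, group) =>
            if code == target then some group
            else if pvStrLt code target then pvBSearch target fuel (mid + 1) hi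
            else pvBSearch target fuel lo (mid - 1)
      else none

def position_group_py_alt (pos : Option String) : Option String :=
  match pos with
  | none => none
  | some p => pvBSearch (PySem.Str.upper p) 33 0 31

-- ===== PRECONDITION & SPEC =====
def Spec_position_group_py (pos : Option String) (out : Option String) : Prop := out = position_group_py_alt pos
instance (pos : Option String) (out : Option String) : Decidable (Spec_position_group_py pos out) := by unfold Spec_position_group_py; infer_instance

-- ===== CLAIM (what is proved, stated in full; the proofs are below) =====
def Claim_equal_position_group_py : Prop := ∀ (pos : Option String), Dom_position_group_py pos → Spec_position_group_py pos (position_group_py pos)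

-- ===== LEMMAS AND PROOFS =====
-- if the target matches no code of the table, the binary search returns none
theorem pvBSearch_none (n : String) (h : ∀ p ∈ pvSorted, p.1 ≠ n) :
    ∀ (fuel : Nat) (lo hi : Int), pvBSearch n fuel lo hi = none := by
  intro fuel
  induction fuel with
  | zero => intro lo hi; rfl
  | succ f ih =>
      intro lo hi
      simp only [pvBSearch]
      split
      · split
        · rfl
        · rename_i code group hg
          have hne : code ≠ n := h (code, group) (PySem.List.mem_of_pyGet?_eq_some _ hg)
          simp only [beq_iff_eq, hne, if_false]
          split
          · exact ih _ _
          · exact ih _ _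
      · rfl

set_option maxHeartbeats 1000000 in
theorem pvScan_eq_bsearch (n : String) :
    pvScanGroups n pvPositionGroups = pvBSearch n 33 0 31 := by
  by_cases h0 : n = "QB"
  · subst h0; decide
  by_cases h1 : n = "HB"
  · subst h1; decide
  by_cases h2 : n = "FB"
  · subst h2; decide
  by_cases h3 : n = "RB"
  · subst h3; decide
  by_cases h4 : n = "WR"
  · subst h4; decide
  by_cases h5 : n = "TE"
  · subst h5; decide
  by_cases h6 : n = "LT"
  · subst h6; decide
  by_cases h7 : n = "LG"
  · subst h7; decide
  by_cases h8 : n = "C"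
  · subst h8; decide
  by_cases h9 : n = "RG"
  · subst h9; decide
  by_cases h10 : n = "RT"
  · subst h10; decide
  by_cases h11 : n = "OL"
  · subst h11; decide
  by_cases h12 : n = "LE"
  · subst h12; decide
  by_cases h13 : n = "RE"
  · subst h13; decide
  by_cases h14 : n = "DT"
  · subst h14; decide
  by_cases h15 : n = "DL"
  · subst h15; decide
  by_cases h16 : n = "REDG"
  · subst h16; decide
  by_cases h17 : n = "LOLB"
  · subst h17; decide
  by_cases h18 : n = "MLB"
  · subst h18; decide
  by_cases h19 : n = "ROLB"
  · subst h19; decide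
  by_cases h20 : n = "LB"
  · subst h20; decide
  by_cases h21 : n = "SAM"
  · subst h21; decide
  by_cases h22 : n = "WILL"
  · subst h22; decide
  by_cases h23 : n = "MIKE"
  · subst h23; decide
  by_cases h24 : n = "CB"
  · subst h24; decide
  by_cases h25 : n = "FS"
  · subst h25; decide
  by_cases h26 : n = "SS"
  · subst h26; decide
  by_cases h27 : n = "S"
  · subst h27; decide
  by_cases h28 : n = "DB"
  · subst h28; decide
  by_cases h29 : n = "K"
  · subst h29; decide
  by_cases h30 : n = "P"
  · subst h30; decide
  by_cases h31 : n = "LS"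
  · subst h31; decide
  have hscan : pvScanGroups n pvPositionGroups = none := by
    simp [pvPositionGroups, pvScanGroups, PySem.Set.contains,
      h0, h1, h2, h3, h4, h5, h6, h7, h8, h9, h10, h11, h12, h13, h14, h15, h16,
      h17, h18, h19, h20, h21, h22, h23, h24, h25, h26, h27, h28, h29, h30, h31, Ne.symm]
  have hbs : pvBSearch n 33 0 31 = none := by
    apply pvBSearch_none
    intro p hp
    simp only [pvSorted, List.mem_cons, List.not_mem_nil, or_false] at hp
    rcases hp with rfl | rfl | rfl | rfl | rfl | rfl | rfl | rfl | rfl | rfl | rfl | rfl |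
      rfl | rfl | rfl | rfl | rfl | rfl | rfl | rfl | rfl | rfl | rfl | rfl | rfl | rfl |
      rfl | rfl | rfl | rfl | rfl | rfl <;>
      simp_all [Ne.symm]
  rw [hscan, hbs]

-- ===== VERDICT (by name: the statement is the Claim_ definition above) =====
theorem position_group_py_spec : Claim_equal_position_group_py := by
  intro pos _
  unfold Spec_position_group_py position_group_py position_group_py_alt
  cases pos with
  | none => rfl
  | some p => exact pvScan_eq_bsearch (PySem.Str.upper p)
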